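-- pv_equiv track=rewrite | github.com/savourylie/dstk | dstk/transformation.py | find_cut_points
-- ===== SOURCE A (Python) =====
-- from math import ceil
--
-- def find_cut_points(arr, method, num_bins=10):
--
--     len_arr = len(arr)
--     bin_size = ceil(len_arr / num_bins)
--
--     if method == 'equal_pop':
--         arr_sorted = sorted(list(arr), reverse=True)
--         cut_points = []
--         prev_pos = 0
--         pos = bin_size
--
--         for i, x in enumerate(arr_sorted):
--             if i < pos:
--                 if pos < len_arr:
--                     continue
--
--                 else:
--                     cut_points.append((arr_sorted[prev_pos], min(arr_sorted) - 1))
--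
--                     num_bins = len(cut_points)
--                     return num_bins, cut_points
--
--             if arr_sorted[pos] == arr_sorted[pos - 1]:
--                 if i == len_arr - 1:
--                     cut_points.append((arr_sorted[prev_pos], arr_sorted[pos] - 1))
--
--                     num_bins = len(cut_points)
--                     return num_bins, cut_points
--
--                 else:
--                     pos += 1
--
--             else:
--                 if i == len_arr - 1:
--                     cut_points.append((arr_sorted[prev_pos], arr_sorted[pos] - 1))
--
--                     num_bins = len(cut_points)
--                     return num_bins, cut_points
--
--                 else:
--                     cut_points.append((arr_sorted[prev_pos], arr_sorted[pos]))
--                 prev_pos = pos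
--                 pos += bin_size
-- ===== SOURCE B (Python) =====
-- from math import ceil
--
-- def find_cut_points(arr, method, num_bins=10):
--     # Run-boundary approach: precompute the sorted array's run-start indices once,
--     # then emit one cut per bin boundary by jumping between run starts; every
--     # terminal path of the scan closes the last bin with (s[prev], s[n-1] - 1).
--     if method != 'equal_pop' or not arr:
--         return None
--     n = len(arr)
--     bin_size = ceil(n / num_bins)
--     s = sorted(arr, reverse=True)
--     # start indices of value runs, excluding the one at the last index
--     starts = [j for j in range(1, n - 1) if s[j] != s[j - 1]]
--     cuts = []
--     prev = 0
--     pos = bin_size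
--     k = 0
--     while pos < n:
--         while k < len(starts) and starts[k] < pos:
--             k += 1
--         if k == len(starts):
--             break
--         j = starts[k]
--         cuts.append((s[prev], s[j]))
--         prev = j
--         pos = j + bin_size
--     cuts.append((s[prev], s[n - 1] - 1))
--     return len(cuts), cuts
-- ===== Notes on version B (the rewrite author's own statement) =====
-- stated objective: alternative
-- what changed: B precomputes the sorted array's run-start indices in one pass and then walks that starts list to emit one cut per bin boundary, using the observation that every terminal path of A appends (s[prev], s[n-1]-1); A instead enumerates every element and resolves ties by stepping pos one index at a time inside the scan.
-- outside the precondition, e.g. on find_cut_points([1, 2], 'equal_pop', -5): A returns (2, [(2, 2), (2, 1)]), B returns (1, [(2, 0)]); on find_cut_points([1], 'equal_pop', -6): A returns (1, [(1, 0)]), B returns (1, [(1, 0)])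
import Mathlib
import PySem

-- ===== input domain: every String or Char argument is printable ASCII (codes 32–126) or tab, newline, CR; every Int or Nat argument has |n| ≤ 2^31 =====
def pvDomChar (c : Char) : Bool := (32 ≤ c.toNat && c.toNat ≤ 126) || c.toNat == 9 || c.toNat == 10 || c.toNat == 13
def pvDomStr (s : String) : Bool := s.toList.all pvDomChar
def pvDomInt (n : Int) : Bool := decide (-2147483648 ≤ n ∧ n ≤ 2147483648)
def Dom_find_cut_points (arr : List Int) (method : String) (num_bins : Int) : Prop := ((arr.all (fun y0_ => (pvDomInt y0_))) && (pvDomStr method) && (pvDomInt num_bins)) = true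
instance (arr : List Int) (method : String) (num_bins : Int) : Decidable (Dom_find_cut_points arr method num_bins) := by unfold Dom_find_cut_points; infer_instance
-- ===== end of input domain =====

-- B precomputes the sorted array's run-start indices and walks that list, one cut per bin boundary,
-- closing the last bin uniformly with (s[prev], s[n-1]-1); objective: alternative decomposition.


-- ceil(a / b) for b ≠ 0; exact for math.ceil(a / b) at these magnitudes (the float quotient cannot round across an integer)
def pvCeilDiv (a b : Int) : Int := -(PySem.Int.floordiv (-a) b)

-- ===== PORT A =====
-- the 'for i, x in enumerate(arr_sorted)' loop of A; i is the enumerate index; returns none when the loop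
-- falls through (Python's implicit None) or on an IndexError (unreachable inside Pre_)
def fcpA_loop (s : List Int) (n bin_size : Int) (prev pos : Int) (cuts : List (Int × Int)) (i : Nat) :
    Option (Int × (List (Int × Int))) :=
  if _h : (i : Int) < n then
    if (i : Int) < pos then
      if pos < n then
        fcpA_loop s n bin_size prev pos cuts (i + 1)
      else
        match PySem.List.pyGet? s prev, PySem.List.min? s (fun x => x) with
        | some sp, some m =>
          let cuts' := cuts ++ [(sp, m - 1)]
          some ((cuts'.length : Int), cuts')
        | _, _ => none
    else
      match PySem.List.pyGet? s pos, PySem.List.pyGet? s (pos - 1) with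
      | some a, some b =>
        if a = b then
          if (i : Int) = n - 1 then
            match PySem.List.pyGet? s prev with
            | some sp =>
              let cuts' := cuts ++ [(sp, a - 1)]
              some ((cuts'.length : Int), cuts')
            | none => none
          else
            fcpA_loop s n bin_size prev (pos + 1) cuts (i + 1)
        else
          if (i : Int) = n - 1 then
            match PySem.List.pyGet? s prev with
            | some sp =>
              let cuts' := cuts ++ [(sp, a - 1)]
              some ((cuts'.length : Int), cuts')
            | none => none
          else
            match PySem.List.pyGet? s prev with
            | some sp => fcpA_loop s n bin_size pos (pos + bin_size) (cuts ++ [(sp, a)]) (i + 1)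
            | none => none
      | _, _ => none
  else none
termination_by n.toNat - i
decreasing_by all_goals omega

def find_cut_points (arr : List Int) (method : String) (num_bins : Int) : Option (Int × (List (Int × Int))) :=
  let len_arr : Int := arr.length
  if num_bins = 0 then none          -- ZeroDivisionError in Python; excluded by Pre_
  else
    let bin_size : Int := pvCeilDiv len_arr num_bins
    if method = "equal_pop" then
      let arr_sorted := PySem.List.sorted arr (fun x => x) true
      fcpA_loop arr_sorted len_arr bin_size 0 bin_size [] 0
    else none

-- ===== PORT B =====
-- the 'while pos < n' walk of Source B over the precomputed run-start list (k advances by dropping heads);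
-- returns the final (prev, cuts); none marks an IndexError (unreachable inside Pre_)
def fcpB_walk (s : List Int) (n bin_size : Int) :
    List Int → Int → Int → List (Int × Int) → Option (Int × (List (Int × Int)))
  | starts, pos, prev, cuts =>
    if pos < n then
      match starts with
      | [] => some (prev, cuts)
      | j :: rest =>
        if j < pos then fcpB_walk s n bin_size rest pos prev cuts
        else
          match PySem.List.pyGet? s prev, PySem.List.pyGet? s j with
          | some sp, some a => fcpB_walk s n bin_size rest (j + bin_size) j (cuts ++ [(sp, a)])
          | _, _ => none
    else some (prev, cuts)

-- the final 'cuts.append((s[prev], s[n-1] - 1)); return len(cuts), cuts' of Source B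
def fcpB_fin (s : List Int) (n : Int) : Option (Int × (List (Int × Int))) → Option (Int × (List (Int × Int)))
  | some (prev, cuts) =>
    match PySem.List.pyGet? s prev, PySem.List.pyGet? s (n - 1) with
    | some sp, some last =>
      let c := cuts ++ [(sp, last - 1)]
      some ((c.length : Int), c)
    | _, _ => none
  | none => none

def find_cut_points_alt (arr : List Int) (method : String) (num_bins : Int) : Option (Int × (List (Int × Int))) :=
  if method ≠ "equal_pop" ∨ arr = [] then none
  else
    let n : Int := arr.length
    if num_bins = 0 then none        -- ZeroDivisionError in Python; excluded by Pre_
    else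
      let bin_size : Int := pvCeilDiv n num_bins
      let s := PySem.List.sorted arr (fun x => x) true
      let starts := (PySem.List.pyRange 1 (n - 1) 1).filter
        (fun j => !(PySem.List.pyGet? s j == PySem.List.pyGet? s (j - 1)))
      fcpB_fin s n (fcpB_walk s n bin_size starts bin_size 0 [])

-- ===== PRECONDITION & SPEC =====
-- Pre_ excludes num_bins = 0 (A raises ZeroDivisionError computing bin_size before the method check) and,
-- for method 'equal_pop', negative num_bins, which is outside the binning task's natural domain (A then runs
-- on negative wrapped indices and usually raises IndexError, while B's boundary walk may not terminate).
def Pre_find_cut_points (arr : List Int) (method : String) (num_bins : Int) : Prop :=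
  1 ≤ num_bins ∨ (method ≠ "equal_pop" ∧ num_bins ≠ 0)
instance (arr : List Int) (method : String) (num_bins : Int) : Decidable (Pre_find_cut_points arr method num_bins) := by unfold Pre_find_cut_points; infer_instance
def pvWitness_find_cut_points : List Int × String × Int := ([3, 1, 2, 2], "equal_pop", 2)

def Spec_find_cut_points (arr : List Int) (method : String) (num_bins : Int) (out : Option (Int × (List (Int × Int)))) : Prop := out = find_cut_points_alt arr method num_bins
instance (arr : List Int) (method : String) (num_bins : Int) (out : Option (Int × (List (Int × Int)))) : Decidable (Spec_find_cut_points arr method num_bins out) := by unfold Spec_find_cut_points; infer_instance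

-- ===== CLAIM =====
def Claim_equal_find_cut_points : Prop := ∀ (arr : List Int) (method : String) (num_bins : Int), Dom_find_cut_points arr method num_bins → Pre_find_cut_points arr method num_bins → Spec_find_cut_points arr method num_bins (find_cut_points arr method num_bins)

-- ===== LEMMAS AND PROOFS =====

-- A's enumerate loop only skips while i is below the boundary pos (and pos is in range)
theorem fcpA_skip (s : List Int) (n bin_size : Int) (prev pos : Int) (cuts : List (Int × Int)) :
    ∀ (k i : Nat), pos.toNat - i = k → (i : Int) ≤ pos → pos < n →
      fcpA_loop s n bin_size prev pos cuts i = fcpA_loop s n bin_size prev pos cuts pos.toNat := by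
  intro k
  induction k with
  | zero =>
    intro i hk hle hlt
    have : i = pos.toNat := by omega
    rw [this]
  | succ k ih =>
    intro i hk hle hlt
    have h1 : (i : Int) < pos := by omega
    have h2 : (i : Int) < n := by omega
    rw [fcpA_loop, dif_pos h2, if_pos h1, if_pos hlt]
    exact ih (i + 1) (by omega) (by omega) hlt

-- inside a run of equal values A only advances pos by one; it reaches the next stopping index j unchanged
theorem fcpA_walkTies (s : List Int) (n bin_size prev : Int) (cuts : List (Int × Int))
    (hlen : (s.length : Int) = n) :
    ∀ (d : Nat) (pos j : Int), (j - pos).toNat = d → 1 ≤ pos → pos ≤ j → j ≤ n - 1 →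
      (∀ p, pos ≤ p → p < j → PySem.List.pyGet? s p = PySem.List.pyGet? s (p - 1)) →
      fcpA_loop s n bin_size prev pos cuts pos.toNat = fcpA_loop s n bin_size prev j cuts j.toNat := by
  intro d
  induction d with
  | zero =>
    intro pos j hd _ hle _ _
    have : j = pos := by omega
    rw [this]
  | succ d ih =>
    intro pos j hd h1 hle hjn htie
    have hposn : pos < n := by omega
    have hcast : ((pos.toNat : Nat) : Int) = pos := Int.toNat_of_nonneg (by omega)
    have ha : PySem.List.pyGet? s pos = some s[pos.toNat] :=
      PySem.List.pyGet?_eq_some_getElem s (by omega) (by omega)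
    have hb : PySem.List.pyGet? s (pos - 1) = some s[pos.toNat] := by
      rw [← htie pos le_rfl (by omega)]; exact ha
    rw [fcpA_loop, dif_pos (by omega), if_neg (by omega), ha, hb]
    dsimp only
    rw [if_pos rfl, if_neg (by omega : ¬ ((pos.toNat : Int) = n - 1))]
    have hstep : pos.toNat + 1 = (pos + 1).toNat := by omega
    rw [hstep]
    exact ih (pos + 1) j (by omega) (by omega) (by omega) hjn
      (fun p hp1 hp2 => htie p (by omega) hp2)

-- on a descending-sorted list, min(s) is the last element
theorem min_eq_last (s : List Int) (hs : s.Pairwise (fun a b => b ≤ a)) (hne : s ≠ []) :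
    PySem.List.min? s (fun x => x) = PySem.List.pyGet? s ((s.length : Int) - 1) := by
  have hlen : 0 < s.length := List.length_pos_iff.mpr hne
  have hget : PySem.List.pyGet? s ((s.length : Int) - 1) = some s[((s.length : Int) - 1).toNat] :=
    PySem.List.pyGet?_eq_some_getElem s (by omega) (by omega)
  have htn : ((s.length : Int) - 1).toNat = s.length - 1 := by omega
  cases hm : PySem.List.min? s (fun x => x) with
  | none =>
    exact absurd ((PySem.List.min?_eq_none_iff s (fun x => x)).mp hm) hne
  | some m =>
    rw [hget]
    have hmem := PySem.List.min?_mem hm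
    have hmin := PySem.List.min?_isMin hm
    have hpg := List.pairwise_iff_getElem.mp hs
    obtain ⟨i, hi, hie⟩ := List.mem_iff_getElem.mp hmem
    have hle1 : m ≤ s[((s.length : Int) - 1).toNat] :=
      hmin _ (List.getElem_mem _)
    have hle2 : s[((s.length : Int) - 1).toNat] ≤ m := by
      rcases Nat.lt_or_ge i (s.length - 1) with hlt | hge
      · have := hpg i (s.length - 1) hi (by omega) hlt
        simp only [htn]
        omega
      · have : i = s.length - 1 := by omega
        subst this
        simp only [htn, hie]
        omega
    have : m = s[((s.length : Int) - 1).toNat] := le_antisymm hle1 hle2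
    rw [this]

-- the run-start walk of B computes exactly what A's element scan computes, then fcpB_fin closes the bin
theorem fcp_main (s : List Int) (n bin_size : Int)
    (hlen : (s.length : Int) = n) (hn : 1 ≤ n) (hb : 1 ≤ bin_size)
    (hs : s.Pairwise (fun a b => b ≤ a)) :
    ∀ (rest : List Int) (pos prev : Int) (cuts : List (Int × Int)) (i : Nat),
      (∀ j ∈ rest, 1 ≤ j ∧ j ≤ n - 2 ∧ PySem.List.pyGet? s j ≠ PySem.List.pyGet? s (j - 1)) →
      (∀ p, pos ≤ p → 1 ≤ p → p ≤ n - 2 → PySem.List.pyGet? s p ≠ PySem.List.pyGet? s (p - 1) → p ∈ rest) →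
      rest.Pairwise (· < ·) →
      (i : Int) ≤ pos → (i : Int) < n → 0 ≤ prev → prev < n → 1 ≤ pos →
      fcpA_loop s n bin_size prev pos cuts i =
        fcpB_fin s n (fcpB_walk s n bin_size rest pos prev cuts) := by
  have hne : s ≠ [] := by
    intro h; rw [h] at hlen; simp at hlen; omega
  have hmin : PySem.List.min? s (fun x => x) = PySem.List.pyGet? s (n - 1) := by
    rw [min_eq_last s hs hne, hlen]
  intro rest
  induction rest with
  | nil =>
    intro pos prev cuts i _ hcomp _ hile hin hprev0 hprevn hpos
    by_cases hpn : pos < n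
    · -- A's scan skips to pos, then walks the run of ties to the last index n-1
      have hn2 : 2 ≤ n := by omega
      rw [fcpA_skip s n bin_size prev pos cuts (pos.toNat - i) i rfl hile hpn]
      have htie : ∀ p, pos ≤ p → p < n - 1 →
          PySem.List.pyGet? s p = PySem.List.pyGet? s (p - 1) := by
        intro p hp1 hp2
        by_contra hc
        exact absurd (hcomp p hp1 (by omega) (by omega) hc) (List.not_mem_nil)
      rw [fcpA_walkTies s n bin_size prev cuts hlen (n - 1 - pos).toNat pos (n - 1) rfl
        hpos (by omega) le_rfl htie]
      have hcast : (((n - 1).toNat : Nat) : Int) = n - 1 := by omega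
      have ha : PySem.List.pyGet? s (n - 1) = some s[(n - 1).toNat] :=
        PySem.List.pyGet?_eq_some_getElem s (by omega) (by omega)
      have hb' : ∃ b, PySem.List.pyGet? s (n - 1 - 1) = some b :=
        ⟨_, PySem.List.pyGet?_eq_some_getElem s (by omega) (by omega)⟩
      obtain ⟨bb, hbb⟩ := hb'
      have hsp : PySem.List.pyGet? s prev = some s[prev.toNat] :=
        PySem.List.pyGet?_eq_some_getElem s (by omega) (by omega)
      rw [fcpA_loop, dif_pos (by omega), if_neg (by omega), ha, hbb]
      dsimp only
      rw [fcpB_walk, if_pos hpn]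
      simp only [fcpB_fin, hsp, ha]
      by_cases hab : s[(n - 1).toNat] = bb
      · rw [if_pos hab, if_pos (by omega : ((n - 1).toNat : Int) = n - 1)]
      · rw [if_neg hab, if_pos (by omega : ((n - 1).toNat : Int) = n - 1)]
    · -- pos ran past the end: A's min(s)-1 terminal equals B's uniform s[n-1]-1 closing
      rw [fcpA_loop, dif_pos hin, if_pos (by omega), if_neg hpn]
      rw [fcpB_walk, if_neg hpn]
      have hsp : PySem.List.pyGet? s prev = some s[prev.toNat] :=
        PySem.List.pyGet?_eq_some_getElem s (by omega) (by omega)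
      have hl : PySem.List.pyGet? s (n - 1) = some s[(n - 1).toNat] :=
        PySem.List.pyGet?_eq_some_getElem s (by omega) (by omega)
      simp only [fcpB_fin, hsp, hmin, hl]
  | cons j rest' ih =>
    intro pos prev cuts i hmem hcomp hpw hile hin hprev0 hprevn hpos
    obtain ⟨hj1, hj2, hjb⟩ := hmem j (List.mem_cons_self)
    by_cases hpn : pos < n
    · by_cases hjpos : j < pos
      · -- head below pos: B drops it; no boundary information is lost
        rw [fcpB_walk, if_pos hpn, if_pos hjpos]
        exact ih pos prev cuts i (fun x hx => hmem x (List.mem_cons_of_mem _ hx))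
          (fun p hp1 hp2 hp3 hp4 => by
            rcases List.mem_cons.mp (hcomp p hp1 hp2 hp3 hp4) with h | h
            · omega
            · exact h)
          (List.Pairwise.of_cons hpw) hile hin hprev0 hprevn hpos
      · -- head j is the least boundary ≥ pos: A's tie walk stops exactly there
        have hjge : pos ≤ j := by omega
        rw [fcpA_skip s n bin_size prev pos cuts (pos.toNat - i) i rfl hile hpn]
        have htie : ∀ p, pos ≤ p → p < j →
            PySem.List.pyGet? s p = PySem.List.pyGet? s (p - 1) := by
          intro p hp1 hp2
          by_contra hc
          rcases List.mem_cons.mp (hcomp p hp1 (by omega) (by omega) hc) with h | h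
          · omega
          · have := (List.pairwise_cons.mp hpw).1 p h
            omega
        rw [fcpA_walkTies s n bin_size prev cuts hlen (j - pos).toNat pos j rfl
          hpos hjge (by omega) htie]
        have ha : PySem.List.pyGet? s j = some s[j.toNat] :=
          PySem.List.pyGet?_eq_some_getElem s (by omega) (by omega)
        have hb' : PySem.List.pyGet? s (j - 1) = some s[(j - 1).toNat] :=
          PySem.List.pyGet?_eq_some_getElem s (by omega) (by omega)
        have hab : ¬ s[j.toNat] = s[(j - 1).toNat] := by
          intro h
          apply hjb
          rw [ha, hb', h]
        have hsp : PySem.List.pyGet? s prev = some s[prev.toNat] :=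
          PySem.List.pyGet?_eq_some_getElem s (by omega) (by omega)
        rw [fcpA_loop, dif_pos (by omega : ((j.toNat : Nat) : Int) < n),
          if_neg (by omega), ha, hb']
        dsimp only
        rw [if_neg hab, if_neg (by omega : ¬ ((j.toNat : Int) = n - 1)), hsp]
        rw [fcpB_walk, if_pos hpn, if_neg (by omega : ¬ j < pos), hsp, ha]
        dsimp only
        exact ih (j + bin_size) j (cuts ++ [(s[prev.toNat], s[j.toNat])]) (j.toNat + 1)
          (fun x hx => hmem x (List.mem_cons_of_mem _ hx))
          (fun p hp1 hp2 hp3 hp4 => by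
            rcases List.mem_cons.mp (hcomp p (by omega) hp2 hp3 hp4) with h | h
            · omega
            · exact h)
          (List.Pairwise.of_cons hpw) (by omega) (by omega) (by omega) (by omega) (by omega)
    · rw [fcpA_loop, dif_pos hin, if_pos (by omega), if_neg hpn]
      rw [fcpB_walk, if_neg hpn]
      have hsp : PySem.List.pyGet? s prev = some s[prev.toNat] :=
        PySem.List.pyGet?_eq_some_getElem s (by omega) (by omega)
      have hl : PySem.List.pyGet? s (n - 1) = some s[(n - 1).toNat] :=
        PySem.List.pyGet?_eq_some_getElem s (by omega) (by omega)
      simp only [fcpB_fin, hsp, hmin, hl]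

theorem bin_size_pos (n num_bins : Int) (hn : 1 ≤ n) (hq : 1 ≤ num_bins) : 1 ≤ pvCeilDiv n num_bins := by
  have h := PySem.Int.le_floordiv_iff_mul_le (a := -n) (b := num_bins) (q := 0) (by omega)
  unfold pvCeilDiv
  omega

-- ===== VERDICT =====
theorem find_cut_points_spec : Claim_equal_find_cut_points := by
  intro arr method num_bins _ hpre
  unfold Spec_find_cut_points find_cut_points find_cut_points_alt
  dsimp only
  by_cases hm : method = "equal_pop"
  · have hq : 1 ≤ num_bins := by
      rcases hpre with h | ⟨hm', _⟩
      · exact h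
      · exact absurd hm hm'
    by_cases he : arr = []
    · subst he
      rw [if_neg (by omega : ¬ num_bins = 0), if_pos hm,
        if_pos (Or.inr rfl)]
      rw [fcpA_loop, dif_neg (by simp)]
    · have hn : 1 ≤ (arr.length : Int) := by
        have : arr.length ≠ 0 := fun h => he (List.length_eq_zero_iff.mp h)
        omega
      rw [if_neg (by omega : ¬ num_bins = 0), if_pos hm,
        if_neg (by simp [hm, he] : ¬ (method ≠ "equal_pop" ∨ arr = [])),
        if_neg (by omega : ¬ num_bins = 0)]
      have hb := bin_size_pos (arr.length : Int) num_bins hn hq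
      set s := PySem.List.sorted arr (fun x => x) true with hsdef
      have hlen : (s.length : Int) = (arr.length : Int) := by
        rw [hsdef, PySem.List.length_sorted]
      have hsorted : s.Pairwise (fun a b => b ≤ a) := by
        rw [hsdef]
        exact PySem.List.sorted_pairwise_rev arr (fun x => x) 
      apply fcp_main s (arr.length : Int) (pvCeilDiv (arr.length : Int) num_bins) hlen hn hb hsorted
      · -- every element of starts is a genuine in-range run boundary
        intro j hj
        rw [List.mem_filter] at hj
        obtain ⟨hjr, hjp⟩ := hj
        rw [PySem.List.mem_pyRange_one] at hjr
        refine ⟨hjr.1, by omega, ?_⟩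
        intro h
        simp [h] at hjp
      · -- every in-range run boundary is in starts
        intro p _ hp1 hp2 hp4
        rw [List.mem_filter]
        refine ⟨PySem.List.mem_pyRange_one.mpr ⟨hp1, by omega⟩, ?_⟩
        simpa using hp4
      · exact List.Pairwise.filter _ (PySem.List.pairwise_lt_pyRange_one 1 ((arr.length : Int) - 1))
      · omega
      · omega
      · omega
      · omega
      · omega
  · have hq : num_bins ≠ 0 := by
      rcases hpre with h | ⟨_, h⟩
      · omega
      · exact h
    rw [if_neg hq, if_neg hm, if_pos (Or.inl hm)]
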